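-- pv_equiv track=rewrite | github.com/Kakarlamonika913/Top-100-codes- | total all of the matching integer elements in an array.py | sum_of_matching_elements
-- ===== SOURCE A (Python) =====
-- def sum_of_matching_elements(arr):
--     seen = set()
--     duplicates = set()
--     for num in arr:
--         if num in seen:
--             duplicates.add(num)
--         seen.add(num)
--     return sum(duplicates)
-- ===== SOURCE B (Python) =====
-- def sum_of_matching_elements(arr):
--     s = sorted(arr)
--     total = 0
--     for i in range(1, len(s)):
--         if s[i] == s[i-1] and (i < 2 or s[i] != s[i-2]):
--             total += s[i]
--     return total
-- ===== Notes on version B (the rewrite author's own statement) =====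
-- stated objective: alternative
-- what changed: Replaced A's single-pass dual-set tracking (seen + duplicates) with sort-then-adjacent-scan: sort the array, then add s[i] exactly at the second element of each run of equal values (s[i]==s[i-1] and s[i]!=s[i-2]).
import Mathlib
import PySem

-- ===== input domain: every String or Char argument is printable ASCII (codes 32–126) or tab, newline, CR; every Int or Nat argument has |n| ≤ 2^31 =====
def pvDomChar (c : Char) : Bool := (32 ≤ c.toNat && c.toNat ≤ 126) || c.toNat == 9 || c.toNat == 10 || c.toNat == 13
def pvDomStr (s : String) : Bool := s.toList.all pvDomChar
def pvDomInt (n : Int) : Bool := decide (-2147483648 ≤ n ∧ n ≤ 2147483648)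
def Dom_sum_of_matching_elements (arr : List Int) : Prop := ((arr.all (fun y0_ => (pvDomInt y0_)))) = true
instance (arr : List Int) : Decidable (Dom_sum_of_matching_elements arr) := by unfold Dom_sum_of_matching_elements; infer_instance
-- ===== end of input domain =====

-- B replaces A's single-pass dual-set tracking (seen + duplicates) with a
-- sort-then-adjacent-scan: sort the array and add the value at the second
-- element of each run of equal values; objective: alternative.


-- ===== PORT A =====
-- for num in arr: if num in seen: duplicates.add(num); seen.add(num); return sum(duplicates)
-- (sum over a Python set of ints is order-independent, so summing the Set's element list is exact)
def sum_of_matching_elements (arr : List Int) : Int :=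
  let res := arr.foldl
    (fun (p : PySem.Set Int × PySem.Set Int) num =>
      (PySem.Set.add p.1 num,
       if PySem.Set.contains p.1 num then PySem.Set.add p.2 num else p.2))
    (PySem.Set.empty, PySem.Set.empty)
  res.2.sum

-- ===== PORT B =====
-- s = sorted(arr); for i in range(1, len(s)):
--   if s[i] == s[i-1] and (i < 2 or s[i] != s[i-2]): total += s[i]
-- (indices i, i-1, i-2 are always in range where they are read, so pyGetD is exact)
def sum_of_matching_elements_alt (arr : List Int) : Int :=
  let s := PySem.List.sorted arr (fun x => x) false
  (PySem.List.pyRange 1 (s.length : Int) 1).foldl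
    (fun total i =>
      if PySem.List.pyGetD s i 0 = PySem.List.pyGetD s (i - 1) 0 ∧
          (i < 2 ∨ PySem.List.pyGetD s i 0 ≠ PySem.List.pyGetD s (i - 2) 0)
      then total + PySem.List.pyGetD s i 0
      else total)
    0

-- ===== PRECONDITION & SPEC =====
def Spec_sum_of_matching_elements (arr : List Int) (out : Int) : Prop := out = sum_of_matching_elements_alt arr
instance (arr : List Int) (out : Int) : Decidable (Spec_sum_of_matching_elements arr out) := by unfold Spec_sum_of_matching_elements; infer_instance

-- ===== CLAIM =====
def Claim_equal_sum_of_matching_elements : Prop := ∀ (arr : List Int), Dom_sum_of_matching_elements arr → Spec_sum_of_matching_elements arr (sum_of_matching_elements arr)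

-- ===== LEMMAS AND PROOFS =====

-- the canonical value: the distinct elements occurring at least twice
def pvDupList (arr : List Int) : List Int :=
  (PySem.Set.ofList arr).filter (fun k => 1 < arr.count k)

-- A's loop body
def pvStepA (p : PySem.Set Int × PySem.Set Int) (num : Int) : PySem.Set Int × PySem.Set Int :=
  (PySem.Set.add p.1 num,
   if PySem.Set.contains p.1 num then PySem.Set.add p.2 num else p.2)

theorem pvFold_snd_mem (l : List Int) (p : PySem.Set Int × PySem.Set Int) (x : Int) :
    x ∈ (l.foldl pvStepA p).2 ↔ x ∈ p.2 ∨ (x ∈ p.1 ∧ x ∈ l) ∨ 2 ≤ l.count x := by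
  induction l generalizing p with
  | nil => simp
  | cons a t ih =>
      have hc : x ∈ t ↔ 1 ≤ t.count x := by
        rw [Nat.one_le_iff_ne_zero, ← Nat.pos_iff_ne_zero, List.count_pos_iff]
      simp only [List.foldl_cons, ih, pvStepA, PySem.Set.mem_add, List.mem_cons,
        List.count_cons]
      by_cases hs : a ∈ p.1 <;> by_cases hx : x = a
      · subst hx; simp [hs]
      · simp [hs, hx, Ne.symm hx]
      · subst hx
        rw [if_neg (by simpa [PySem.Set.contains_iff] using hs)]
        simp only [hs, false_and, false_or, or_true, true_and, beq_self_eq_true, if_true]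
        constructor
        · rintro (h | h | h)
          · exact Or.inl h
          · exact Or.inr (by have := hc.mp h; omega)
          · exact Or.inr (by omega)
        · rintro (h | h)
          · exact Or.inl h
          · rcases Nat.lt_or_ge (List.count x t) 2 with h2 | h2
            · exact Or.inr (Or.inl (hc.mpr (by omega)))
            · exact Or.inr (Or.inr h2)
      · simp [hs, hx, Ne.symm hx]

theorem pvFold_snd_nodup (l : List Int) (p : PySem.Set Int × PySem.Set Int)
    (h : p.2.Nodup) : (l.foldl pvStepA p).2.Nodup := by
  induction l generalizing p with
  | nil => exact h
  | cons a t ih =>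
      apply ih
      by_cases hs : a ∈ p.1
      · simpa [pvStepA, hs] using PySem.Set.nodup_add p.2 a h
      · simpa [pvStepA, hs] using h

theorem pvDup_nodup (arr : List Int) : (pvDupList arr).Nodup :=
  (PySem.Set.nodup_ofList arr).filter _

theorem pvDup_mem (arr : List Int) (x : Int) :
    x ∈ pvDupList arr ↔ 2 ≤ arr.count x := by
  simp only [pvDupList, List.mem_filter, PySem.Set.mem_ofList, decide_eq_true_eq]
  constructor
  · rintro ⟨_, h⟩; omega
  · intro h
    exact ⟨List.count_pos_iff.mp (by omega), by omega⟩

-- A computes the canonical value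
theorem pvA_eq (arr : List Int) : sum_of_matching_elements arr = (pvDupList arr).sum := by
  unfold sum_of_matching_elements
  show (arr.foldl pvStepA (PySem.Set.empty, PySem.Set.empty)).2.sum = _
  apply List.Perm.sum_eq
  apply (List.perm_ext_iff_of_nodup ?_ (pvDup_nodup arr)).mpr
  · intro x
    rw [pvDup_mem, pvFold_snd_mem]
    simp [PySem.Set.empty]
  · exact pvFold_snd_nodup arr _ (by simp [PySem.Set.empty])

-- the canonical value is invariant under permutation
theorem pvDup_perm_sum (l l' : List Int) (h : l.Perm l') :
    (pvDupList l).sum = (pvDupList l').sum := by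
  apply List.Perm.sum_eq
  apply (List.perm_ext_iff_of_nodup (pvDup_nodup l) (pvDup_nodup l')).mpr
  intro x
  rw [pvDup_mem, pvDup_mem, h.count_eq]

-- peeling one element off the canonical value
theorem pvDup_cons_sum (b : Int) (l : List Int) :
    (pvDupList (b :: l)).sum = (if l.count b = 1 then b else 0) + (pvDupList l).sum := by
  by_cases h1 : l.count b = 1
  · rw [if_pos h1]
    have hperm : (pvDupList (b :: l)).Perm (b :: pvDupList l) := by
      apply (List.perm_ext_iff_of_nodup (pvDup_nodup _) ?_).mpr
      · intro x
        rw [pvDup_mem, List.mem_cons, pvDup_mem]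
        by_cases hx : x = b
        · subst hx
          rw [List.count_cons_self]
          constructor
          · intro _; exact Or.inl rfl
          · intro _; omega
        · rw [List.count_cons_of_ne (Ne.symm hx)]
          simp [hx]
      · exact List.Nodup.cons (by rw [pvDup_mem]; omega) (pvDup_nodup l)
    rw [hperm.sum_eq, List.sum_cons]
  · rw [if_neg h1]
    have hperm : (pvDupList (b :: l)).Perm (pvDupList l) := by
      apply (List.perm_ext_iff_of_nodup (pvDup_nodup _) (pvDup_nodup _)).mpr
      intro x
      rw [pvDup_mem, pvDup_mem]
      by_cases hx : x = b
      · subst hx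
        rw [List.count_cons_self]
        omega
      · rw [List.count_cons_of_ne (Ne.symm hx)]
    rw [hperm.sum_eq]
    ring

-- B as a structural scan over the sorted tail, with the two last-seen values as state
def pvScan : Int → Int → List Int → Int
  | _, _, [] => 0
  | a, b, c :: r => (if c = b ∧ c ≠ a then c else 0) + pvScan b c r

theorem pvDup_singleton_sum (x : Int) : (pvDupList [x]).sum = 0 := by
  have h : pvDupList [x] = [] := by
    rw [List.eq_nil_iff_forall_not_mem]
    intro y hy
    rw [pvDup_mem] at hy
    have := List.count_singleton' y x ▸ hy
    split at this <;> omega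
  rw [h]; rfl

-- on a sorted tail, the scan collects each duplicated value once
theorem pvScan_eq (rest : List Int) : ∀ (a b : Int),
    (b :: rest).Pairwise (· ≤ ·) →
    pvScan a b rest = (pvDupList (b :: rest)).sum - (if a = b ∧ b ∈ rest then b else 0) := by
  induction rest with
  | nil =>
      intro a b _
      rw [pvScan, pvDup_singleton_sum]
      simp
  | cons c r ih =>
      intro a b hpw
      have hpw' : (c :: r).Pairwise (· ≤ ·) := hpw.of_cons
      rw [pvScan, ih b c hpw', pvDup_cons_sum b (c :: r)]
      by_cases hbc : b = c
      · obtain rfl := hbc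
        rw [List.count_cons_self]
        by_cases hbr : b ∈ r
        · have hcnt : 1 ≤ r.count b := List.count_pos_iff.mpr hbr
          by_cases hab : a = b
          · rw [if_neg (show ¬(r.count b + 1 = 1) from by omega),
                if_neg (show ¬(b = b ∧ b ≠ a) from fun h => h.2 hab.symm),
                if_pos (show b = b ∧ b ∈ r from ⟨rfl, hbr⟩),
                if_pos (show a = b ∧ b ∈ b :: r from ⟨hab, by simp⟩)]
            ring
          · rw [if_neg (show ¬(r.count b + 1 = 1) from by omega),
                if_pos (show b = b ∧ b ≠ a from ⟨rfl, fun h => hab h.symm⟩),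
                if_pos (show b = b ∧ b ∈ r from ⟨rfl, hbr⟩),
                if_neg (show ¬(a = b ∧ b ∈ b :: r) from fun h => hab h.1)]
            ring
        · have hcnt : r.count b = 0 := List.count_eq_zero.mpr hbr
          by_cases hab : a = b
          · rw [if_pos (show r.count b + 1 = 1 from by omega),
                if_neg (show ¬(b = b ∧ b ≠ a) from fun h => h.2 hab.symm),
                if_neg (show ¬(b = b ∧ b ∈ r) from fun h => hbr h.2),
                if_pos (show a = b ∧ b ∈ b :: r from ⟨hab, by simp⟩)]
            ring
          · rw [if_pos (show r.count b + 1 = 1 from by omega),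
                if_pos (show b = b ∧ b ≠ a from ⟨rfl, fun h => hab h.symm⟩),
                if_neg (show ¬(b = b ∧ b ∈ r) from fun h => hbr h.2),
                if_neg (show ¬(a = b ∧ b ∈ b :: r) from fun h => hab h.1)]
            ring
      · -- b < c ≤ everything in r, so b occurs nowhere in c :: r
        have hble : ∀ x ∈ c :: r, b ≤ x := (List.pairwise_cons.mp hpw).1
        have hcle : ∀ x ∈ r, c ≤ x := (List.pairwise_cons.mp hpw').1
        have hnot : b ∉ c :: r := by
          intro hmem
          rcases List.mem_cons.mp hmem with h | h
          · exact hbc h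
          · have h1 := hble c (by simp)
            have h2 := hcle b h
            exact hbc (le_antisymm h1 h2)
        have hcnt : (c :: r).count b = 0 := List.count_eq_zero.mpr hnot
        rw [if_neg (show ¬((c :: r).count b = 1) from by omega),
            if_neg (show ¬(c = b ∧ c ≠ a) from fun h => hbc h.1.symm),
            if_neg (show ¬(b = c ∧ c ∈ r) from fun h => hbc h.1),
            if_neg (show ¬(a = b ∧ b ∈ c :: r) from fun h => hnot h.2)]
        ring

-- B's index loop beyond the first step is the structural scan
theorem pvFold_scan (s : List Int) : ∀ (post pre : List Int) (a b total : Int),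
    s = pre ++ a :: b :: post →
    (PySem.List.pyRange ((pre.length : Int) + 2) (s.length : Int) 1).foldl
      (fun total i =>
        if PySem.List.pyGetD s i 0 = PySem.List.pyGetD s (i - 1) 0 ∧
            (i < 2 ∨ PySem.List.pyGetD s i 0 ≠ PySem.List.pyGetD s (i - 2) 0)
        then total + PySem.List.pyGetD s i 0
        else total)
      total
    = total + pvScan a b post := by
  intro post
  induction post with
  | nil =>
      intro pre a b total hs
      have hlen : (s.length : Int) ≤ (pre.length : Int) + 2 := by
        subst hs; simp
      rw [PySem.List.pyRange_one_eq_nil hlen, List.foldl_nil, pvScan]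
      ring
  | cons c r ih =>
      intro pre a b total hs
      have hlen : s.length = pre.length + 3 + r.length := by
        subst hs; simp; omega
      have hk : (pre.length : Int) + 2 < (s.length : Int) := by
        rw [hlen]; push_cast; omega
      rw [PySem.List.pyRange_one_cons hk, List.foldl_cons]
      -- the three reads at index pre.length + 2
      have hgc : PySem.List.pyGetD s ((pre.length : Int) + 2) 0 = c := by
        have h2 : ((pre.length : Int) + 2) = ((pre.length + 2 : Nat) : Int) := by push_cast; ring
        rw [h2, PySem.List.pyGetD_natCast, hs]
        rw [List.getD_eq_getElem?_getD, List.getElem?_append_right (by omega)]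
        simp
      have hgb : PySem.List.pyGetD s ((pre.length : Int) + 2 - 1) 0 = b := by
        have h2 : ((pre.length : Int) + 2 - 1) = ((pre.length + 1 : Nat) : Int) := by push_cast; ring
        rw [h2, PySem.List.pyGetD_natCast, hs]
        rw [List.getD_eq_getElem?_getD, List.getElem?_append_right (by omega)]
        simp
      have hga : PySem.List.pyGetD s ((pre.length : Int) + 2 - 2) 0 = a := by
        have h2 : ((pre.length : Int) + 2 - 2) = ((pre.length : Nat) : Int) := by ring
        rw [h2, PySem.List.pyGetD_natCast, hs]
        rw [List.getD_eq_getElem?_getD, List.getElem?_append_right (by omega)]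
        simp
      have hnot2 : ¬ ((pre.length : Int) + 2 < 2) := by omega
      have hstep : ((pre.length : Int) + 2 + 1) = (((pre ++ [a]).length : Int) + 2) := by
        simp; ring
      rw [hgc, hgb, hga, hstep,
        ih (pre ++ [a]) b c _ (by rw [hs]; simp)]
      rw [pvScan]
      by_cases hcb : c = b
      · by_cases hca : c = a
        · rw [if_neg (by simp [hca, hnot2]), if_neg (by simp [hca])]
          ring
        · rw [if_pos ⟨hcb, Or.inr hca⟩, if_pos ⟨hcb, hca⟩]
          ring
      · rw [if_neg (by simp [hcb]), if_neg (by simp [hcb])]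
        ring

-- B's whole loop on any sorted list computes the canonical value
theorem pvB_key (s : List Int) (hpw : s.Pairwise (· ≤ ·)) :
    (PySem.List.pyRange 1 (s.length : Int) 1).foldl
      (fun total i =>
        if PySem.List.pyGetD s i 0 = PySem.List.pyGetD s (i - 1) 0 ∧
            (i < 2 ∨ PySem.List.pyGetD s i 0 ≠ PySem.List.pyGetD s (i - 2) 0)
        then total + PySem.List.pyGetD s i 0
        else total)
      0
    = (pvDupList s).sum := by
  match s, hpw with
  | [], _ =>
      rw [PySem.List.pyRange_one_eq_nil (by simp), List.foldl_nil]
      rfl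
  | [x], _ =>
      rw [PySem.List.pyRange_one_eq_nil (by simp), List.foldl_nil, pvDup_singleton_sum]
  | x0 :: x1 :: rest, hpw =>
      have h1n : (1 : Int) < ((x0 :: x1 :: rest).length : Int) := by simp
      rw [PySem.List.pyRange_one_cons h1n, List.foldl_cons]
      have hg1 : PySem.List.pyGetD (x0 :: x1 :: rest) (1 : Int) 0 = x1 := by
        have h2 : (1 : Int) = ((1 : Nat) : Int) := by norm_num
        rw [h2, PySem.List.pyGetD_natCast]; rfl
      have hg0 : PySem.List.pyGetD (x0 :: x1 :: rest) ((1 : Int) - 1) 0 = x0 := by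
        have h2 : ((1 : Int) - 1) = ((0 : Nat) : Int) := by norm_num
        rw [h2, PySem.List.pyGetD_natCast]; rfl
      have hstep : ((1 : Int) + 1) = ((([] : List Int).length : Int) + 2) := by simp
      rw [hg1, hg0, hstep,
        pvFold_scan (x0 :: x1 :: rest) rest [] x0 x1 _ (by simp)]
      have hpick : (if x1 = x0 ∧ ((1 : Int) < 2 ∨ x1 ≠ PySem.List.pyGetD (x0 :: x1 :: rest) ((1 : Int) - 2) 0) then 0 + x1 else 0) = (if x1 = x0 then x1 else 0) := by
        by_cases hx : x1 = x0
        · rw [if_pos ⟨hx, Or.inl (by norm_num)⟩, if_pos hx]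
          ring
        · rw [if_neg (fun h => hx h.1), if_neg hx]
      rw [hpick]
      have hscan : pvScan (x0 - 1) x0 (x1 :: rest) =
          (if x1 = x0 then x1 else 0) + pvScan x0 x1 rest := by
        rw [pvScan]
        by_cases hx : x1 = x0
        · rw [if_pos ⟨hx, show x1 ≠ x0 - 1 from by omega⟩, if_pos hx]
        · rw [if_neg (fun h => hx h.1), if_neg hx]
      rw [← hscan]
      have hS := pvScan_eq (x1 :: rest) (x0 - 1) x0 hpw
      rw [if_neg (show ¬(x0 - 1 = x0 ∧ x0 ∈ x1 :: rest) from fun h => by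
        have := h.1; omega)] at hS
      rw [hS]
      ring

-- ===== VERDICT =====
theorem sum_of_matching_elements_spec : Claim_equal_sum_of_matching_elements := by
  intro arr _
  show sum_of_matching_elements arr = sum_of_matching_elements_alt arr
  rw [pvA_eq]
  have hpw : (PySem.List.sorted arr (fun x => x) false).Pairwise (· ≤ ·) := by
    have := PySem.List.sorted_pairwise (xs := arr) (key := fun x => x)
    simpa using this
  have hperm : (PySem.List.sorted arr (fun x => x) false).Perm arr :=
    PySem.List.sorted_perm arr (fun x => x) false
  rw [pvDup_perm_sum arr _ hperm.symm]
  exact (pvB_key _ hpw).symm
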